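-- pv_equiv track=rewrite | github.com/jive-vlbi/sched | src/pysched/vex.py | block_def2str
-- ===== SOURCE A (Python) =====
-- from collections import defaultdict, OrderedDict
--
-- def block_def2str(name, block_def, keyword="def", mode_stations={}):
--     ret = """
-- {} {};
-- """.format(keyword, name)[1:]
--
--     # add a comment in which mode this is referenced by which stations
--     for mode, stations in sorted(mode_stations.items()):
--         ret += """
-- * {}: {}
-- """.format(mode, ", ".join(sorted(stations)))[1:]
--
--     # align columns for the same param value lines
--     param_columns = {param_value[0]: defaultdict(int)
--                      for param_value in block_def}
--     for param_value in block_def: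
--         param = param_value[0]
--         for column, value in enumerate(param_value[1:]):
--             param_columns[param][column] = \
--                 max(param_columns[param][column], len(str(value)))
--     for param_value in block_def:
--         param = param_value[0]
--         ret += "     {} = {};\n".format(
--             param,
--             " : ".join("{:>{width}}".format(value,
--                                             width=param_columns[param][column])
--                        for column, value in enumerate(param_value[1:])))
--     ret += "end{};\n".format(keyword)
--     return ret
-- ===== SOURCE B (Python) =====
-- def _col_width(block_def, param, c):
--     # widest value in column c (0-based after the param) among rows of this param;
--     # only called with c >= 0
--     w = 0
--     for r in block_def:
--         if r[0] == param and c + 1 < len(r):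
--             w = max(w, len(str(r[c + 1])))
--     return w
--
-- def block_def2str(name, block_def, keyword="def", mode_stations={}):
--     lines = ["{} {};".format(keyword, name)]
--     lines += ["* {}: {}".format(m, ", ".join(sorted(s)))
--               for m, s in sorted(mode_stations.items())]
--     lines += ["     {} = {};".format(
--                   row[0],
--                   " : ".join(str(v).rjust(_col_width(block_def, row[0], c))
--                              for c, v in enumerate(row[1:])))
--               for row in block_def]
--     lines.append("end{};".format(keyword))
--     return "".join(line + "\n" for line in lines)
-- ===== Notes on version B (the rewrite author's own statement) =====
-- stated objective: alternative
-- what changed: B drops A's precomputed dict-of-defaultdicts width table entirely and instead computes each column width on demand by a direct scan over block_def (plus building the output as a list of lines joined once instead of repeated string concatenation).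
import Mathlib
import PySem

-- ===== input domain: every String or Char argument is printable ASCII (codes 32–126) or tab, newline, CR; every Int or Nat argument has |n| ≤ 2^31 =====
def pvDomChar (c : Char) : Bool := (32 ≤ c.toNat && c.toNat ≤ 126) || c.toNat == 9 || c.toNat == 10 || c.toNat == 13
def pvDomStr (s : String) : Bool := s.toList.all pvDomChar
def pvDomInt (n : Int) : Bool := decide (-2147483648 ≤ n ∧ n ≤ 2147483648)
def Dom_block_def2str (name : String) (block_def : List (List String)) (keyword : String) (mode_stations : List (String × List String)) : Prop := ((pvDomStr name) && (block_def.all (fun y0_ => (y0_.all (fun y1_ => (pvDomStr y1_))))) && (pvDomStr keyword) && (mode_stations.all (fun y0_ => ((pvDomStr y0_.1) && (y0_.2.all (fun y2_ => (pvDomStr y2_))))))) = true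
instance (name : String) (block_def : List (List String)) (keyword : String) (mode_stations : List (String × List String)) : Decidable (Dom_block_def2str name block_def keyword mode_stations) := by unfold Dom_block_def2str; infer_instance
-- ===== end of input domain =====

-- B replaces A's precomputed dict-of-defaultdicts of column widths by a direct per-cell scan
-- (no width table at all); objective: alternative (same output, different algorithm, B is O(rows²·cols)).

-- shared helper: "{:>{w}}".format(v) / str.rjust — right-justify with spaces (exact: no padding when w ≤ len)
def pvPad (w : Int) (s : String) : String :=
  String.ofList (List.replicate (w.toNat - s.toList.length) ' ') ++ s

-- ===== PORT A =====
-- A's param_columns: {row[0]: defaultdict(int) for row in block_def}, then the max-update loop.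
-- (Python indexes param_columns[param] where the key is always present; getD with an empty
--  default is exact because the comprehension has inserted every row[0].)
-- row[0] is ported as row.headD "" (exact on Pre_: rows are nonempty; Python raises on []).
def pvParamColumnsA (block_def : List (List String)) : PySem.Dict String (PySem.Dict Int Int) :=
  let init : PySem.Dict String (PySem.Dict Int Int) :=
    block_def.foldl (fun d row => d.insert (row.headD "") PySem.Dict.empty) PySem.Dict.empty
  block_def.foldl (fun d row =>
    (PySem.List.enumerate (row.drop 1)).foldl
      (fun d cv =>
        d.insert (row.headD "")
          ((d.getD (row.headD "") PySem.Dict.empty).insert cv.1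
            (max ((d.getD (row.headD "") PySem.Dict.empty).getD cv.1 0) (PySem.Str.len cv.2)))) d) init

def block_def2str (name : String) (block_def : List (List String)) (keyword : String) (mode_stations : List (String × List String)) : String :=
  let ret := keyword ++ " " ++ name ++ ";\n"
  let ret := (PySem.List.sorted (PySem.Dict.ofList mode_stations).items (fun p => p.1) false).foldl
      (fun ret p => ret ++ ("* " ++ p.1 ++ ": " ++ PySem.Str.join ", " (PySem.List.sorted p.2 (fun s => s) false) ++ "\n")) ret
  let param_columns := pvParamColumnsA block_def
  let ret := block_def.foldl (fun ret row =>
      ret ++ ("     " ++ row.headD "" ++ " = " ++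
        PySem.Str.join " : " ((PySem.List.enumerate (row.drop 1)).map
          (fun cv => pvPad ((param_columns.getD (row.headD "") PySem.Dict.empty).getD cv.1 0) cv.2)) ++ ";\n")) ret
  ret ++ ("end" ++ keyword ++ ";\n")

-- ===== PORT B =====
-- B's _col_width: a direct scan of block_def; r[0] as r.headD "" (exact on Pre_), r[c+1] guarded by c+1 < len(r)
def pvColWidth (block_def : List (List String)) (param : String) (c : Int) : Int :=
  block_def.foldl (fun w r =>
    if r.headD "" == param && decide (c + 1 < (r.length : Int))
    then max w (PySem.Str.len (PySem.List.pyGetD r (c + 1) ""))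
    else w) 0

def block_def2str_alt (name : String) (block_def : List (List String)) (keyword : String) (mode_stations : List (String × List String)) : String :=
  let lines := [keyword ++ " " ++ name ++ ";"]
  let lines := lines ++ (PySem.List.sorted (PySem.Dict.ofList mode_stations).items (fun p => p.1) false).map
      (fun p => "* " ++ p.1 ++ ": " ++ PySem.Str.join ", " (PySem.List.sorted p.2 (fun s => s) false))
  let lines := lines ++ block_def.map (fun row =>
      "     " ++ row.headD "" ++ " = " ++
        PySem.Str.join " : " ((PySem.List.enumerate (row.drop 1)).map
          (fun cv => pvPad (pvColWidth block_def (row.headD "") cv.1) cv.2)) ++ ";")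
  let lines := lines ++ ["end" ++ keyword ++ ";"]
  PySem.Str.join "" (lines.map (fun l => l ++ "\n"))

-- ===== PRECONDITION & SPEC =====
-- Pre_ excludes block_defs containing an empty row, on which both Pythons raise IndexError (row[0]).
def Pre_block_def2str (_name : String) (block_def : List (List String)) (_keyword : String) (_mode_stations : List (String × List String)) : Prop :=
  ∀ row ∈ block_def, row ≠ []
instance (name : String) (block_def : List (List String)) (keyword : String) (mode_stations : List (String × List String)) : Decidable (Pre_block_def2str name block_def keyword mode_stations) := by unfold Pre_block_def2str; infer_instance

def pvWitness_block_def2str : String × List (List String) × String × (List (String × List String)) :=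
  ("FREQ", [["sample_rate", "8.0"], ["chan_def", "A", "BBB"], ["chan_def", "CC", "D"]], "def", [("m1", ["St2", "St1"])])

def Spec_block_def2str (name : String) (block_def : List (List String)) (keyword : String) (mode_stations : List (String × List String)) (out : String) : Prop := out = block_def2str_alt name block_def keyword mode_stations
instance (name : String) (block_def : List (List String)) (keyword : String) (mode_stations : List (String × List String)) (out : String) : Decidable (Spec_block_def2str name block_def keyword mode_stations out) := by unfold Spec_block_def2str; infer_instance

-- ===== CLAIM (what is proved, stated in full; the proofs are below) =====
def Claim_equal_block_def2str : Prop := ∀ (name : String) (block_def : List (List String)) (keyword : String) (mode_stations : List (String × List String)), Dom_block_def2str name block_def keyword mode_stations → Pre_block_def2str name block_def keyword mode_stations → Spec_block_def2str name block_def keyword mode_stations (block_def2str name block_def keyword mode_stations)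

-- ===== LEMMAS AND PROOFS =====

-- a string-building foldl, at the character-list level
theorem pvFoldlAppend_toList {α : Type} (l : List α) (f : α → String) (init : String) :
    (l.foldl (fun r x => r ++ f x) init).toList
      = init.toList ++ (l.map (fun x => (f x).toList)).flatten := by
  induction l generalizing init with
  | nil => simp
  | cons a t ih => simp [ih, String.toList_append]

-- "".join over character lists is concatenation
theorem pvJoinNil (ls : List (List Char)) : PySem.Chars.join [] ls = ls.flatten := by
  simp only [PySem.Chars.join]
  simp [List.intercalate]
  induction ls with
  | nil => simp
  | cons a t ih => cases t <;> simp_all [List.intersperse]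

-- "".join at the String level
theorem pvJoinStr (parts : List String) :
    (PySem.Str.join "" parts).toList = (parts.map String.toList).flatten := by
  rw [PySem.Str.toList_join, show ("" : String).toList = [] from rfl, pvJoinNil]

-- a string-building foldl is "".join
theorem pvFoldlAppend {α : Type} (l : List α) (f : α → String) (init : String) :
    l.foldl (fun r x => r ++ f x) init = init ++ PySem.Str.join "" (l.map f) := by
  refine String.toList_inj.mp ?_
  rw [pvFoldlAppend_toList, String.toList_append, pvJoinStr, List.map_map]
  rfl

theorem pvJoinStrAppend (l1 l2 : List String) :
    PySem.Str.join "" (l1 ++ l2) = PySem.Str.join "" l1 ++ PySem.Str.join "" l2 := by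
  refine String.toList_inj.mp ?_
  rw [pvJoinStr, String.toList_append, pvJoinStr, pvJoinStr, List.map_append, List.flatten_append]

theorem pvJoinStrSingleton (s : String) : PySem.Str.join "" [s] = s := by
  refine String.toList_inj.mp ?_
  rw [pvJoinStr]
  simp

theorem pvInner (l : List String) (p0 param : String) (i : Int) :
    ∀ (s : Int) (d : PySem.Dict String (PySem.Dict Int Int)),
    ((((PySem.List.enumerate l s).foldl
        (fun d cv =>
          d.insert p0
            ((d.getD p0 PySem.Dict.empty).insert cv.1
              (max ((d.getD p0 PySem.Dict.empty).getD cv.1 0) (PySem.Str.len cv.2)))) d).getD param PySem.Dict.empty).getD i 0)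
      = if param = p0 ∧ s ≤ i ∧ i < s + l.length
        then max ((d.getD param PySem.Dict.empty).getD i 0) (PySem.Str.len (PySem.List.pyGetD l (i - s) ""))
        else (d.getD param PySem.Dict.empty).getD i 0 := by
  induction l with
  | nil =>
    intro s d
    rw [if_neg (by rintro ⟨_, h1, h2⟩; simp only [List.length_nil] at h2; omega)]
    simp [PySem.List.enumerate_nil]
  | cons hd tl ih =>
    intro s d
    rw [PySem.List.enumerate_cons, List.foldl_cons, ih]
    by_cases hp : param = p0
    · subst hp
      rw [PySem.Dict.getD_insert_self, PySem.Dict.getD_insert]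
      by_cases hi : i = s
      · subst hi
        rw [if_neg (by rintro ⟨_, h1, _⟩; omega), if_pos rfl,
            if_pos ⟨rfl, le_refl _, by simp only [List.length_cons]; push_cast; omega⟩,
            PySem.List.pyGetD_of_nonneg _ _ (by omega)]
        simp
      · rw [if_neg hi]
        by_cases hr : s + 1 ≤ i ∧ i < s + 1 + tl.length
        · rw [if_pos ⟨rfl, hr.1, by have := hr.2; omega⟩,
              if_pos ⟨rfl, by omega, by have := hr.2; simp only [List.length_cons]; push_cast at this ⊢; omega⟩,
              PySem.List.pyGetD_of_nonneg _ _ (by omega),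
              PySem.List.pyGetD_of_nonneg _ _ (by omega)]
          have h1 : (i - s).toNat = (i - (s + 1)).toNat + 1 := by omega
          rw [h1, List.getD_cons_succ]
        · rw [if_neg (by rintro ⟨_, h1, h2⟩; exact hr ⟨h1, by omega⟩),
              if_neg (by rintro ⟨_, h1, h2⟩; simp only [List.length_cons] at h2; push_cast at h2; omega)]
    · rw [if_neg (by rintro ⟨h, _⟩; exact hp h), if_neg (by rintro ⟨h, _⟩; exact hp h),
          PySem.Dict.getD_insert]
      rw [if_neg hp]

theorem pvOuter (rows : List (List String)) (param : String) (i : Int) (hi : 0 ≤ i) :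
    ∀ (d : PySem.Dict String (PySem.Dict Int Int)),
    (((rows.foldl (fun d row =>
        (PySem.List.enumerate (row.drop 1)).foldl
          (fun d cv =>
            d.insert (row.headD "")
              ((d.getD (row.headD "") PySem.Dict.empty).insert cv.1
                (max ((d.getD (row.headD "") PySem.Dict.empty).getD cv.1 0) (PySem.Str.len cv.2)))) d) d).getD param PySem.Dict.empty).getD i 0)
      = rows.foldl (fun w r =>
          if r.headD "" == param && decide (i + 1 < (r.length : Int))
          then max w (PySem.Str.len (PySem.List.pyGetD r (i + 1) ""))
          else w) (((d.getD param PySem.Dict.empty).getD i 0)) := by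
  induction rows with
  | nil => intro d; simp
  | cons r t ih =>
    intro d
    rw [List.foldl_cons, List.foldl_cons, ih, pvInner]
    congr 1
    simp only [List.headD_eq_head?_getD] at *
    by_cases hq : r.head?.getD "" = param
    · by_cases hc : i + 1 < (r.length : Int)
      · rw [if_pos ⟨hq.symm, hi, by simp only [List.length_drop]; omega⟩,
            if_pos (by simp [hq, hc])]
        rw [sub_zero, PySem.List.pyGetD_of_nonneg _ _ hi, PySem.List.pyGetD_of_nonneg _ _ (by omega)]
        congr 1
        simp only [List.getD, List.getElem?_drop]
        rw [show 1 + i.toNat = (i + 1).toNat by omega]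
      · rw [if_neg (by rintro ⟨_, _, h2⟩; simp only [List.length_drop] at h2; omega),
            if_neg (by simp [hq, hc])]
    · rw [if_neg (by rintro ⟨h, _⟩; exact hq h.symm),
          if_neg (by simp [hq])]


-- the comprehension {row[0]: defaultdict(int) …} stores only empty dicts
theorem pvInitZero (rows : List (List String)) (param : String) (i : Int)
    (d : PySem.Dict String (PySem.Dict Int Int))
    (h : ((d.getD param PySem.Dict.empty).getD i 0) = 0) :
    (((rows.foldl (fun d row => d.insert (row.headD "") PySem.Dict.empty) d).getD param PySem.Dict.empty).getD i 0) = 0 := by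
  induction rows generalizing d with
  | nil => simpa using h
  | cons r t ih =>
    refine ih _ ?_
    rw [PySem.Dict.getD_insert]
    split
    · simp [PySem.Dict.getD_empty]
    · exact h

-- A's width table agrees with B's direct scan
theorem pvWidth (bd : List (List String)) (param : String) (i : Int) (hi : 0 ≤ i) :
    ((pvParamColumnsA bd).getD param PySem.Dict.empty).getD i 0 = pvColWidth bd param i := by
  unfold pvParamColumnsA pvColWidth
  rw [pvOuter bd param i hi, pvInitZero bd param i PySem.Dict.empty (by simp [PySem.Dict.getD_empty])]

-- per row, A's padded cells equal B's padded cells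
theorem pvCells (bd : List (List String)) (row : List String) :
    (PySem.List.enumerate (row.drop 1)).map
        (fun cv => pvPad (((pvParamColumnsA bd).getD (row.headD "") PySem.Dict.empty).getD cv.1 0) cv.2)
      = (PySem.List.enumerate (row.drop 1)).map
        (fun cv => pvPad (pvColWidth bd (row.headD "") cv.1) cv.2) := by
  apply List.map_congr_left
  intro cv hcv
  obtain ⟨k, hk, rfl⟩ := (PySem.List.mem_enumerate_iff _ _ _).mp hcv
  rw [pvWidth _ _ _ (by simp)]


-- ===== VERDICT (by name: the statement is the Claim_ definition above) =====
theorem block_def2str_spec : Claim_equal_block_def2str := by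
  intro name bd kw ms _dom _pre
  unfold Spec_block_def2str
  simp only [block_def2str, block_def2str_alt]
  rw [pvFoldlAppend, pvFoldlAppend]
  simp only [List.map_append, List.map_cons, List.map_nil, pvJoinStrAppend,
             pvJoinStrSingleton, List.map_map]
  have hmode : ∀ p : String × List String,
      ("* " ++ p.1 ++ ": " ++ PySem.Str.join ", " (PySem.List.sorted p.2 (fun s => s) false) ++ "
")
        = ((fun l => l ++ "
") ∘ fun p : String × List String =>
            "* " ++ p.1 ++ ": " ++ PySem.Str.join ", " (PySem.List.sorted p.2 (fun s => s) false)) p := by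
    intro p
    simp [String.append_assoc]
  have hrow : ∀ row : List String,
      ("     " ++ row.headD "" ++ " = " ++
        PySem.Str.join " : " ((PySem.List.enumerate (row.drop 1)).map
          (fun cv => pvPad (((pvParamColumnsA bd).getD (row.headD "") PySem.Dict.empty).getD cv.1 0) cv.2)) ++ ";
")
        = ((fun l => l ++ "
") ∘ fun row : List String =>
            "     " ++ row.headD "" ++ " = " ++
              PySem.Str.join " : " ((PySem.List.enumerate (row.drop 1)).map
                (fun cv => pvPad (pvColWidth bd (row.headD "") cv.1) cv.2)) ++ ";") row := by
    intro row
    rw [pvCells]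
    simp [String.append_assoc, show (";" : String) ++ "
" = ";
" from rfl]
  rw [List.map_congr_left (fun p _ => hmode p), List.map_congr_left (fun row _ => hrow row)]
  simp [String.append_assoc, show (";" : String) ++ "
" = ";
" from rfl]
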